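-- pv_equiv track=rewrite | github.com/irene8941/Python-CodingTest | CreateWeirdChar.py | solution
-- ===== SOURCE A (Python) =====
-- def solution(s):
--     answer = ""
--
--     idx = 0
--     for totIdx in range(len(s)):
--         if not s[totIdx].isalpha():
--             answer += s[totIdx]
--             idx = 0
--         else:
--             answer += s[totIdx].upper() if idx % 2 == 0 else s[totIdx].lower()
--             idx += 1
--
--     return answer
-- ===== SOURCE B (Python) =====
-- def solution(s):
--     # Run-based: split s into maximal alpha / non-alpha runs; alternate case within each alpha run.
--     out = []
--     i, n = 0, len(s)
--     while i < n:
--         alpha = s[i].isalpha()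
--         j = i
--         while j < n and s[j].isalpha() == alpha:
--             j += 1
--         run = s[i:j]
--         if alpha:
--             out.append(''.join(c.upper() if k % 2 == 0 else c.lower()
--                                for k, c in enumerate(run)))
--         else:
--             out.append(run)
--         i = j
--     return ''.join(out)
-- ===== Notes on version B (the rewrite author's own statement) =====
-- stated objective: alternative
-- what changed: B splits the string into maximal alpha/non-alpha runs and alternates case per run, instead of A's per-character loop carrying a reset index.
import Mathlib
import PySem

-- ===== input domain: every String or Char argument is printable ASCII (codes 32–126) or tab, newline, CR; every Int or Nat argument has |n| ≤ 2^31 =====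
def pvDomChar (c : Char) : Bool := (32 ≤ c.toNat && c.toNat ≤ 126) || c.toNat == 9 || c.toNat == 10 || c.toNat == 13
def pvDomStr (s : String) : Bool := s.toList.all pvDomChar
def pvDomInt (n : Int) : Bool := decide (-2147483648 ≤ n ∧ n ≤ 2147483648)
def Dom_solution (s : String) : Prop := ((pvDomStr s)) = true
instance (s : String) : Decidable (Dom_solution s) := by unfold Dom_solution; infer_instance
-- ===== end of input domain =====

-- B processes maximal alpha/non-alpha runs instead of A's per-character loop with a reset index ("alternative"); return values proved equal on all inputs.

-- ===== PORT A =====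
-- A's for-loop over the characters with accumulator (answer, idx)
def solutionLoop : List Char → Nat → List Char → List Char
  | [], _, ans => ans
  | c :: rest, idx, ans =>
    if ¬ PySem.Chars.isalpha c then
      solutionLoop rest 0 (ans ++ [c])
    else
      solutionLoop rest (idx + 1)
        (ans ++ [if idx % 2 == 0 then PySem.Chars.upperChar c else PySem.Chars.lowerChar c])

def solution (s : String) : String := String.mk (solutionLoop s.toList 0 [])

-- ===== PORT B =====
-- alternating case within one alpha run, k = within-run index
def pvAltRun : List Char → Nat → List Char
  | [], _ => []
  | c :: rest, k =>
    (if k % 2 == 0 then PySem.Chars.upperChar c else PySem.Chars.lowerChar c) :: pvAltRun rest (k + 1)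

-- split into maximal runs by isalpha and process each run
def pvRuns : List Char → List Char
  | [] => []
  | c :: rest =>
    if PySem.Chars.isalpha c then
      pvAltRun ((c :: rest).takeWhile PySem.Chars.isalpha) 0
        ++ pvRuns ((c :: rest).dropWhile PySem.Chars.isalpha)
    else
      (c :: rest).takeWhile (fun x => ! PySem.Chars.isalpha x)
        ++ pvRuns ((c :: rest).dropWhile (fun x => ! PySem.Chars.isalpha x))
  termination_by cs => cs.length
  decreasing_by
    · simpa [List.dropWhile_cons, *] using
        Nat.lt_succ_of_le (List.length_dropWhile_le PySem.Chars.isalpha rest)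
    · simpa [List.dropWhile_cons, *] using
        Nat.lt_succ_of_le (List.length_dropWhile_le (fun x => ! PySem.Chars.isalpha x) rest)

def solution_alt (s : String) : String := String.mk (pvRuns s.toList)

-- ===== PRECONDITION & SPEC =====
def Spec_solution (s : String) (out : String) : Prop := out = solution_alt s
instance (s : String) (out : String) : Decidable (Spec_solution s out) := by unfold Spec_solution; infer_instance

-- ===== CLAIM (what is proved, stated in full; the proofs are below) =====
def Claim_equal_solution : Prop := ∀ (s : String), Dom_solution s → Spec_solution s (solution s)

-- ===== LEMMAS AND PROOFS =====

-- A's loop without the accumulator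
def pvGo : List Char → Nat → List Char
  | [], _ => []
  | c :: rest, idx =>
    if ¬ PySem.Chars.isalpha c then c :: pvGo rest 0
    else (if idx % 2 == 0 then PySem.Chars.upperChar c else PySem.Chars.lowerChar c)
      :: pvGo rest (idx + 1)

theorem solutionLoop_eq_go (cs : List Char) : ∀ (idx : Nat) (ans : List Char),
    solutionLoop cs idx ans = ans ++ pvGo cs idx := by
  induction cs with
  | nil => intro idx ans; simp [solutionLoop, pvGo]
  | cons c rest ih =>
    intro idx ans
    by_cases h : PySem.Chars.isalpha c
    · simp [solutionLoop, pvGo, h, ih]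
    · simp [solutionLoop, pvGo, h, ih]

theorem go_alpha (cs : List Char) : ∀ (idx : Nat),
    pvGo cs idx = pvAltRun (cs.takeWhile PySem.Chars.isalpha) idx
      ++ pvGo (cs.dropWhile PySem.Chars.isalpha) 0 := by
  induction cs with
  | nil => intro idx; simp [pvGo, pvAltRun]
  | cons c rest ih =>
    intro idx
    by_cases h : PySem.Chars.isalpha c
    · simp [pvGo, pvAltRun, h, ih]
    · simp only [List.takeWhile_cons, List.dropWhile_cons, h]
      simp [pvGo, pvAltRun, h]

theorem go_nonalpha (c : Char) (cs : List Char) (hc : PySem.Chars.isalpha c = false) :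
    ∀ (idx : Nat),
    pvGo (c :: cs) idx = (c :: cs).takeWhile (fun x => ! PySem.Chars.isalpha x)
      ++ pvGo ((c :: cs).dropWhile (fun x => ! PySem.Chars.isalpha x)) 0 := by
  induction cs generalizing c with
  | nil => intro idx; simp [pvGo, hc]
  | cons c' rest ih =>
    intro idx
    by_cases h' : PySem.Chars.isalpha c'
    · simp [pvGo, hc, h']
    · have := ih c' (by simpa using h') 0
      simp only [pvGo, hc] at this ⊢
      simp [hc, h'] at this ⊢
      simpa [pvGo, h'] using this

theorem go_eq_runs (cs : List Char) : pvGo cs 0 = pvRuns cs := by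
  induction hn : cs.length using Nat.strong_induction_on generalizing cs with
  | _ n ih =>
    match cs with
    | [] => simp [pvGo, pvRuns]
    | c :: rest =>
      by_cases h : PySem.Chars.isalpha c
      · rw [go_alpha, pvRuns]
        simp only [h, if_true]
        congr 1
        have hlt : ((c :: rest).dropWhile PySem.Chars.isalpha).length < n := by
          simpa [List.dropWhile_cons, h, ← hn] using
            Nat.lt_succ_of_le (List.length_dropWhile_le PySem.Chars.isalpha rest)
        exact ih _ hlt _ rfl
      · rw [go_nonalpha c rest (by simpa using h), pvRuns]
        simp only [h]
        congr 1
        have hlt : ((c :: rest).dropWhile (fun x => ! PySem.Chars.isalpha x)).length < n := by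
          simpa [List.dropWhile_cons, h, ← hn] using
            Nat.lt_succ_of_le (List.length_dropWhile_le (fun x => ! PySem.Chars.isalpha x) rest)
        exact ih _ hlt _ rfl

-- ===== VERDICT (by name: the statement is the Claim_ definition above) =====
theorem solution_spec : Claim_equal_solution := by
  intro s _
  unfold Spec_solution solution solution_alt
  rw [solutionLoop_eq_go, go_eq_runs]
  simp
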